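-- pv_equiv track=rewrite | github.com/BetulBNY/Algorithmic-Solutions-to-Problems | 1)Array/How_Many_Numbers_Are_Smaller_Than_the_Current_Number.py | smallerNumbersThanCurrent2
-- ===== SOURCE A (Python) =====
-- def smallerNumbersThanCurrent2(nums:list) -> list :
--     new_dict = {}
--     result_arr = []
--     sorted_nums = nums[:]
--     sorted_nums.sort()         # Or     sorted_nums = sorted(nums)
--
--     for i, val in enumerate(sorted_nums):
--         if val not in new_dict:
--             new_dict[val] = i
--
--     for num in nums:
--         result_arr.append(new_dict[num])
--
--     return result_arr
-- ===== SOURCE B (Python) =====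
-- def smallerNumbersThanCurrent2(nums: list) -> list:
--     return [sum(1 for y in nums if y < x) for x in nums]
-- ===== Notes on version B (the rewrite author's own statement) =====
-- stated objective: simpler
-- what changed: Replaces the sort-and-first-index dictionary construction with a direct quadratic scan: for each element, count the elements strictly smaller than it.
import Mathlib
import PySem

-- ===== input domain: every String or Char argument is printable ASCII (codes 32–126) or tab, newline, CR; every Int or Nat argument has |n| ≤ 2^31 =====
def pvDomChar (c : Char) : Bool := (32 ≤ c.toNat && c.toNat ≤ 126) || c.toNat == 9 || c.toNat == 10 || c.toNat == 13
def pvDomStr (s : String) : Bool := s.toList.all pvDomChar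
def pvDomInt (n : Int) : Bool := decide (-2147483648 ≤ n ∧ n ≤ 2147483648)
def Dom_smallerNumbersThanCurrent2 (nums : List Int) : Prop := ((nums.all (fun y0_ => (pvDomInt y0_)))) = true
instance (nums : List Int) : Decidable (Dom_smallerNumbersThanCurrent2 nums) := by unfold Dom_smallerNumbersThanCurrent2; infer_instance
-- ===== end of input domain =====

-- B replaces the sort + first-index dictionary with a direct quadratic count of strictly smaller elements (simpler).

-- ===== PORT A =====
-- Literal port of A: copy-sort nums, record the first sorted index of each value
-- in a dict, then look each input element up.  The lookup new_dict[num] can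
-- never raise KeyError (num ∈ nums ⊆ sorted_nums, so the key is present);
-- the getD default 0 is on that unreachable path only.
def smallerNumbersThanCurrent2 (nums : List Int) : List Int :=
  let sorted_nums := PySem.List.sorted nums (fun x => x) false
  let new_dict := (PySem.List.enumerate sorted_nums 0).foldl
    (fun d p => if d.contains p.2 then d else d.insert p.2 p.1)
    (PySem.Dict.empty : PySem.Dict Int Int)
  nums.foldl (fun acc num => acc ++ [new_dict.getD num 0]) []

-- ===== PORT B =====
-- Literal port of Source B: [sum(1 for y in nums if y < x) for x in nums]
def smallerNumbersThanCurrent2_alt (nums : List Int) : List Int :=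
  nums.map (fun x => nums.foldl (fun acc y => if y < x then acc + 1 else acc) (0 : Int))

-- ===== PRECONDITION & SPEC =====
def Spec_smallerNumbersThanCurrent2 (nums : List Int) (out : List Int) : Prop := out = smallerNumbersThanCurrent2_alt nums
instance (nums : List Int) (out : List Int) : Decidable (Spec_smallerNumbersThanCurrent2 nums out) := by unfold Spec_smallerNumbersThanCurrent2; infer_instance

-- ===== CLAIM (what is proved, stated in full; the proofs are below) =====
def Claim_equal_smallerNumbersThanCurrent2 : Prop := ∀ (nums : List Int), Dom_smallerNumbersThanCurrent2 nums → Spec_smallerNumbersThanCurrent2 nums (smallerNumbersThanCurrent2 nums)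

-- ===== LEMMAS AND PROOFS =====

-- B's inner fold is acc + (count of elements < x)
theorem pv_foldl_count (v : Int) (xs : List Int) (acc : Int) :
    xs.foldl (fun a y => if y < v then a + 1 else a) acc
      = acc + (xs.countP (fun y => decide (y < v)) : Int) := by
  induction xs generalizing acc with
  | nil => simp
  | cons x t ih =>
    simp only [List.foldl_cons, List.countP_cons, ih]
    by_cases h : x < v <;> simp [h] <;> push_cast <;> omega

-- A's dict fold: looking up v in the keep-first fold gives the old binding if
-- present, else the (offset) first index of v in xs.
theorem pv_dict_fold_get (xs : List Int) (n : Int) (d : PySem.Dict Int Int) (v : Int) :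
    (((PySem.List.enumerate xs n).foldl
        (fun d p => if d.contains p.2 then d else d.insert p.2 p.1) d).get? v)
      = ((d.get? v).orElse
          (fun _ => Option.map (fun k : Nat => n + (k : Int)) (PySem.List.index? xs v))) := by
  induction xs generalizing n d with
  | nil =>
    rw [PySem.List.enumerate_nil]
    cases h : d.get? v <;> simp [h, Option.orElse]
  | cons x t ih =>
    rw [PySem.List.enumerate_cons, List.foldl_cons]
    dsimp only
    by_cases hv : x = v
    · subst hv
      by_cases hc : d.contains x
      · rw [if_pos hc, ih]
        have hs : (d.get? x).isSome := by
          rw [← PySem.Dict.contains_eq_isSome_get?]; exact hc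
        obtain ⟨w, hw⟩ := Option.isSome_iff_exists.mp hs
        simp [hw, Option.orElse]
      · rw [if_neg hc, ih]
        have hg : d.get? x = none := by
          have hiff := PySem.Dict.contains_eq_isSome_get? d x
          cases h : d.get? x
          · rfl
          · rw [h] at hiff; rw [hiff] at hc; simp at hc
        rw [PySem.Dict.get?_insert_self, PySem.List.index?_cons_self, hg]
        simp [Option.orElse]
    · rw [PySem.List.index?_cons_of_ne t hv]
      have hne : v ≠ x := fun h => hv h.symm
      by_cases hc : d.contains x
      · rw [if_pos hc, ih]
        cases h : d.get? v with
        | some w => simp [Option.orElse]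
        | none =>
          simp only [Option.orElse, Option.map_map]
          congr 1
          funext k
          simp only [Function.comp_apply]
          push_cast; ring
      · rw [if_neg hc, ih, PySem.Dict.get?_insert_of_ne d n hne]
        cases h : d.get? v with
        | some w => simp [Option.orElse]
        | none =>
          simp only [Option.orElse, Option.map_map]
          congr 1
          funext k
          simp only [Function.comp_apply]
          push_cast; ring

-- In a ≤-sorted list containing v, the first index of v is the number of
-- elements strictly below v.
theorem pv_sorted_index (s : List Int) (hs : s.Pairwise (fun a b => a ≤ b)) (v : Int)
    (hv : v ∈ s) :
    PySem.List.index? s v = some (s.countP (fun y => decide (y < v))) := by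
  induction s with
  | nil => cases hv
  | cons x t ih =>
    rcases List.pairwise_cons.mp hs with ⟨hx, ht⟩
    by_cases hxv : x = v
    · subst hxv
      rw [PySem.List.index?_cons_self]
      have h0 : t.countP (fun y => decide (y < x)) = 0 := by
        rw [List.countP_eq_zero]
        intro y hy
        simp only [decide_eq_true_eq, not_lt]
        exact hx y hy
      simp [h0]
    · have hvt : v ∈ t := by
        cases hv with
        | head => exact absurd rfl hxv
        | tail _ h => exact h
      have hxlt : x < v := lt_of_le_of_ne (hx v hvt) hxv
      rw [PySem.List.index?_cons_of_ne t hxv, ih ht hvt]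
      simp [hxlt]

-- A's output loop (foldl append) is a map
theorem pv_foldl_append_map (f : Int → Int) (xs : List Int) (acc : List Int) :
    xs.foldl (fun a num => a ++ [f num]) acc = acc ++ xs.map f := by
  induction xs generalizing acc with
  | nil => simp
  | cons x t ih => simp [ih]

-- ===== VERDICT (by name: the statement is the Claim_ definition above) =====
theorem smallerNumbersThanCurrent2_spec : Claim_equal_smallerNumbersThanCurrent2 := by
  intro nums _
  unfold Spec_smallerNumbersThanCurrent2 smallerNumbersThanCurrent2 smallerNumbersThanCurrent2_alt
  rw [pv_foldl_append_map, List.nil_append]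
  apply List.map_congr_left
  intro num hnum
  set s := PySem.List.sorted nums (fun x => x) false with hsdef
  have hperm : s.Perm nums := PySem.List.sorted_perm nums (fun x => x) false
  have hpw : s.Pairwise (fun a b => a ≤ b) := PySem.List.sorted_pairwise nums (fun x => x)
  have hmem : num ∈ s := hperm.mem_iff.mpr hnum
  have hidx := pv_sorted_index s hpw num hmem
  have hget := pv_dict_fold_get s 0 (PySem.Dict.empty : PySem.Dict Int Int) num
  rw [PySem.Dict.get?_empty, hidx] at hget
  simp only [Option.orElse, Option.map_some] at hget
  rw [PySem.Dict.getD_eq_get?_getD, hget]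
  rw [pv_foldl_count]
  have hcount : s.countP (fun y => decide (y < num)) = nums.countP (fun y => decide (y < num)) :=
    hperm.countP_eq _
  simp [hcount]
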